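-- pv_equiv track=rewrite | github.com/nickgreenquist/InterviewPrep | CrackingTheCodingInterview/Chapter16/sumswap.py | sumswap_optimal
-- ===== SOURCE A (Python) =====
-- def sumswap_optimal(list1, list2):
--     sum1 = sum(list1)
--     sum2 = sum(list2)
--
--     if (sum1 - sum2) % 2 != 0:
--         return None
--     target = (sum1 - sum2) // 2
--
--     contents_list2 = set()
--     for b in list2:
--         contents_list2.add(b)
--
--     for a in list1:
--         b = a - target
--         if b in contents_list2:
--             return (a, b)
--     return None
-- ===== SOURCE B (Python) =====
-- def sumswap_optimal(list1, list2):
--     diff = sum(list1) - sum(list2)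
--     if diff % 2 != 0:
--         return None
--     target = diff // 2
--     # invert list1 into a first-occurrence index: value -> earliest position
--     first_index = {}
--     for i, a in enumerate(list1):
--         if a not in first_index:
--             first_index[a] = i
--     # scan list2, keeping the candidate whose list1 position is smallest
--     best = None  # (position in list1, matching list1 value)
--     for b in list2:
--         i = first_index.get(b + target)
--         if i is not None and (best is None or i < best[0]):
--             best = (i, b + target)
--     if best is None:
--         return None
--     a = best[1]
--     return (a, a - target)
-- ===== Notes on version B (the rewrite author's own statement) =====
-- stated objective: alternative
-- what changed: Inverts the roles of the lists: instead of hashing list2 and scanning list1 for a membership hit, B builds a first-occurrence index (value -> earliest position) of list1 once, then scans list2 keeping the candidate with the smallest list1 position (an argmin accumulator), and reconstructs the pair from that minimum.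
import Mathlib
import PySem

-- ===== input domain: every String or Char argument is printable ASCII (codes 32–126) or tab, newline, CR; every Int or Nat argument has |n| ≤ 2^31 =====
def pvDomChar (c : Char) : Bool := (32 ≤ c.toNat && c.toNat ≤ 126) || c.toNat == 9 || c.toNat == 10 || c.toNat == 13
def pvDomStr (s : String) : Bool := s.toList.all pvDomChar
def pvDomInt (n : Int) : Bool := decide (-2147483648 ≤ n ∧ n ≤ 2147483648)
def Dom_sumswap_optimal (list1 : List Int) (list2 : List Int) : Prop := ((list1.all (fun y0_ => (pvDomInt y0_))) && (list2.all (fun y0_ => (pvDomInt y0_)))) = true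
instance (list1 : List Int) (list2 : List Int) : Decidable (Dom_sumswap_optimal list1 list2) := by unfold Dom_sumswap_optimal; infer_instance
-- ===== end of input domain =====

-- B inverts the roles of the lists: a first-occurrence index of list1 plus an argmin scan of list2,
-- instead of A's hash set of list2 plus first-hit scan of list1; alternative decomposition, not faster.

-- ===== PORT A =====
-- first hit in the loop 'for a in list1: b = a - target; if b in contents_list2: return (a, b)'
def pvScanA (target : Int) (contents_list2 : PySem.Set Int) : List Int → Option (Int × Int)
  | [] => none
  | a :: rest =>
    let b := a - target
    if PySem.Set.contains contents_list2 b then some (a, b) else pvScanA target contents_list2 rest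

def sumswap_optimal (list1 : List Int) (list2 : List Int) : Option (Int × Int) :=
  let sum1 := list1.sum
  let sum2 := list2.sum
  if PySem.Int.mod (sum1 - sum2) 2 ≠ 0 then none
  else
    let target := PySem.Int.floordiv (sum1 - sum2) 2
    let contents_list2 := list2.foldl PySem.Set.add PySem.Set.empty
    pvScanA target contents_list2 list1

-- ===== PORT B =====
-- 'for i, a in enumerate(list1): if a not in first_index: first_index[a] = i'
def pvFirstIndexB (list1 : List Int) : PySem.Dict Int Int :=
  (PySem.List.enumerate list1).foldl
    (fun d p => if PySem.Dict.contains d p.2 then d else PySem.Dict.insert d p.2 p.1)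
    PySem.Dict.empty

-- 'for b in list2: i = first_index.get(b + target); if i is not None and (best is None or i < best[0]): best = (i, b + target)'
def pvBestB (d : PySem.Dict Int Int) (target : Int) (list2 : List Int) : Option (Int × Int) :=
  list2.foldl
    (fun best b =>
      match PySem.Dict.get? d (b + target) with
      | none => best
      | some i =>
        match best with
        | none => some (i, b + target)
        | some q => if i < q.1 then some (i, b + target) else best)
    none

def sumswap_optimal_alt (list1 : List Int) (list2 : List Int) : Option (Int × Int) :=
  let diff := list1.sum - list2.sum
  if PySem.Int.mod diff 2 ≠ 0 then none
  else
    let target := PySem.Int.floordiv diff 2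
    match pvBestB (pvFirstIndexB list1) target list2 with
    | none => none
    | some q => some (q.2, q.2 - target)

-- ===== PRECONDITION & SPEC =====
def Spec_sumswap_optimal (list1 : List Int) (list2 : List Int) (out : Option (Int × Int)) : Prop := out = sumswap_optimal_alt list1 list2
instance (list1 : List Int) (list2 : List Int) (out : Option (Int × Int)) : Decidable (Spec_sumswap_optimal list1 list2 out) := by unfold Spec_sumswap_optimal; infer_instance

-- ===== CLAIM (what is proved, stated in full; the proofs are below) =====
def Claim_equal_sumswap_optimal : Prop := ∀ (list1 : List Int) (list2 : List Int), Dom_sumswap_optimal list1 list2 → Spec_sumswap_optimal list1 list2 (sumswap_optimal list1 list2)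

-- ===== LEMMAS AND PROOFS =====

-- the first-occurrence dict is exactly first-index lookup on list1
lemma pvFirstIndexB_get_aux (l : List Int) (s : Int) (d : PySem.Dict Int Int) (v : Int) :
    PySem.Dict.get? ((PySem.List.enumerate l s).foldl
      (fun d p => if PySem.Dict.contains d p.2 then d else PySem.Dict.insert d p.2 p.1) d) v
    = if PySem.Dict.contains d v then PySem.Dict.get? d v
      else Option.map (fun k : Nat => s + (k : Int)) (PySem.List.index? l v) := by
  induction l generalizing s d with
  | nil =>
    simp only [PySem.List.enumerate_nil, List.foldl_nil]
    split_ifs with h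
    · rfl
    · rw [PySem.List.index?_eq_idxOf?]
      simp only [List.idxOf?_nil, Option.map_none]
      exact (PySem.Dict.get?_eq_none_iff_contains d v).2 (by simpa using h)
  | cons a l ih =>
    rw [PySem.List.enumerate_cons]
    simp only [List.foldl_cons]
    by_cases hva : v = a
    · subst hva
      by_cases hdv : PySem.Dict.contains d v = true
      · rw [if_pos hdv, ih, if_pos hdv, if_pos hdv]
      · rw [if_neg hdv, ih, if_neg hdv,
          if_pos (PySem.Dict.contains_insert_self d v s),
          PySem.Dict.get?_insert_self, PySem.List.index?_cons_self]
        simp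
    · have hx : PySem.List.index? (a :: l) v = (PySem.List.index? l v).map (· + 1) :=
        PySem.List.index?_cons_of_ne l (fun h => hva h.symm)
      by_cases hda : PySem.Dict.contains d a = true
      · rw [if_pos hda, ih, hx]
        by_cases hdv : PySem.Dict.contains d v = true
        · rw [if_pos hdv, if_pos hdv]
        · rw [if_neg hdv, if_neg hdv, Option.map_map]
          apply congrFun
          apply congrArg
          funext k
          simp only [Function.comp]
          push_cast
          ring
      · rw [if_neg hda, ih, hx]
        have hcont : PySem.Dict.contains (PySem.Dict.insert d a s) v = PySem.Dict.contains d v := by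
          rw [PySem.Dict.contains_insert]
          simp [hva]
        rw [hcont, PySem.Dict.get?_insert_of_ne d s hva]
        by_cases hdv : PySem.Dict.contains d v = true
        · rw [if_pos hdv, if_pos hdv]
        · rw [if_neg hdv, if_neg hdv, Option.map_map]
          apply congrFun
          apply congrArg
          funext k
          simp only [Function.comp]
          push_cast
          ring

lemma pvFirstIndexB_get (l : List Int) (v : Int) :
    PySem.Dict.get? (pvFirstIndexB l) v
      = Option.map (fun k : Nat => (k : Int)) (PySem.List.index? l v) := by
  unfold pvFirstIndexB
  rw [pvFirstIndexB_get_aux]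
  simp [PySem.Dict.contains_empty]

-- B's argmin loop, abstracted over the lookup g = first index of (b+target) in list1
def pvFoldG (g : Int → Option Int) (target : Int) (l2 : List Int) (acc : Option (Int × Int)) :
    Option (Int × Int) :=
  l2.foldl
    (fun best b =>
      match g (b + target) with
      | none => best
      | some i =>
        match best with
        | none => some (i, b + target)
        | some q => if i < q.1 then some (i, b + target) else best)
    acc

def pvG (l1 : List Int) (v : Int) : Option Int :=
  Option.map (fun k : Nat => (k : Int)) (PySem.List.index? l1 v)

lemma pvBestB_eq_foldG (l1 l2 : List Int) (target : Int) :
    pvBestB (pvFirstIndexB l1) target l2 = pvFoldG (pvG l1) target l2 none := by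
  unfold pvBestB pvFoldG
  have hfun : (fun (best : Option (Int × Int)) (b : Int) =>
      match PySem.Dict.get? (pvFirstIndexB l1) (b + target) with
      | none => best
      | some i =>
        match best with
        | none => some (i, b + target)
        | some q => if i < q.1 then some (i, b + target) else best)
    = (fun (best : Option (Int × Int)) (b : Int) =>
      match pvG l1 (b + target) with
      | none => best
      | some i =>
        match best with
        | none => some (i, b + target)
        | some q => if i < q.1 then some (i, b + target) else best) := by
    funext best b
    rw [pvFirstIndexB_get]
    rfl
  rw [hfun]

lemma pvG_nil (v : Int) : pvG [] v = none := by
  unfold pvG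
  rw [PySem.List.index?_eq_idxOf?]
  rfl

lemma pvG_nonneg (l1 : List Int) (v i : Int) (h : pvG l1 v = some i) : 0 ≤ i := by
  unfold pvG at h
  rcases Option.map_eq_some_iff.1 h with ⟨k, _, hk⟩
  omega

lemma pvG_cons_self (a : Int) (l1 : List Int) : pvG (a :: l1) a = some 0 := by
  unfold pvG
  rw [PySem.List.index?_cons_self]
  rfl

lemma pvG_cons_of_ne (a : Int) (l1 : List Int) (v : Int) (h : v ≠ a) :
    pvG (a :: l1) v = (pvG l1 v).map (fun i => i + 1) := by
  unfold pvG
  rw [PySem.List.index?_cons_of_ne l1 (fun h' => h h'.symm)]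
  simp only [Option.map_map]
  apply congrFun
  apply congrArg
  funext k
  simp only [Function.comp]
  push_cast
  ring

lemma pvG_cons_zero (a : Int) (l1 : List Int) (v : Int) (h : pvG (a :: l1) v = some 0) : v = a := by
  by_cases hva : v = a
  · exact hva
  · rw [pvG_cons_of_ne a l1 v hva] at h
    rcases Option.map_eq_some_iff.1 h with ⟨i, hi, heq⟩
    have := pvG_nonneg l1 v i hi
    omega

lemma pvFoldG_nil_g (target : Int) (l2 : List Int) (acc : Option (Int × Int)) :
    pvFoldG (pvG []) target l2 acc = acc := by
  induction l2 generalizing acc with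
  | nil => rfl
  | cons b rest ih =>
    unfold pvFoldG
    simp only [List.foldl_cons, pvG_nil]
    exact ih acc

-- shifting every index by +1 commutes with the argmin fold
lemma pvFoldG_shift (a target : Int) (l1 l2 : List Int)
    (hno : ∀ b ∈ l2, b + target ≠ a) (acc : Option (Int × Int)) :
    pvFoldG (pvG (a :: l1)) target l2 (acc.map (fun q => (q.1 + 1, q.2)))
      = (pvFoldG (pvG l1) target l2 acc).map (fun q => (q.1 + 1, q.2)) := by
  induction l2 generalizing acc with
  | nil => rfl
  | cons b rest ih =>
    have hb : b + target ≠ a := hno b (List.mem_cons_self ..)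
    have hrest : ∀ b' ∈ rest, b' + target ≠ a := fun b' hb' => hno b' (List.mem_cons_of_mem _ hb')
    unfold pvFoldG
    simp only [List.foldl_cons]
    rw [pvG_cons_of_ne a l1 (b + target) hb]
    cases hg : pvG l1 (b + target) with
    | none =>
      simp only [Option.map_none]
      exact ih hrest acc
    | some i =>
      simp only [Option.map_some]
      cases acc with
      | none =>
        have := ih hrest (some (i, b + target))
        simpa using this
      | some q =>
        by_cases hlt : i < q.1
        · have h2 : i + 1 < q.1 + 1 := by omega
          simp only [Option.map_some, if_pos hlt, if_pos h2]
          have := ih hrest (some (i, b + target))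
          simpa using this
        · have h2 : ¬ (i + 1 < q.1 + 1) := by omega
          simp only [Option.map_some, if_neg hlt, if_neg h2]
          exact ih hrest (some q)

-- once the accumulator holds the minimum possible position 0 with value a, it never changes
lemma pvFoldG_abs_zero (a target : Int) (l1 l2 : List Int) :
    pvFoldG (pvG (a :: l1)) target l2 (some (0, a)) = some (0, a) := by
  induction l2 with
  | nil => rfl
  | cons b rest ih =>
    unfold pvFoldG
    simp only [List.foldl_cons]
    cases hg : pvG (a :: l1) (b + target) with
    | none => exact ih
    | some i =>
      have hi : 0 ≤ i := pvG_nonneg _ _ _ hg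
      have hnlt : ¬ (i < (0 : Int)) := by omega
      simp only [if_neg hnlt]
      exact ih

-- if some b ∈ l2 matches the head a, the fold ends at (0, a), for any acceptable accumulator
lemma pvFoldG_hit (a target : Int) (l1 l2 : List Int)
    (hex : ∃ b ∈ l2, b + target = a) (acc : Option (Int × Int))
    (hinv : ∀ i v, acc = some (i, v) → 0 ≤ i ∧ (i = 0 → v = a)) :
    pvFoldG (pvG (a :: l1)) target l2 acc = some (0, a) := by
  induction l2 generalizing acc with
  | nil => exact absurd hex (by simp)
  | cons b rest ih =>
    unfold pvFoldG
    simp only [List.foldl_cons]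
    by_cases hba : b + target = a
    · rw [hba, pvG_cons_self]
      cases acc with
      | none => exact pvFoldG_abs_zero a target l1 rest
      | some q =>
        rcases hinv q.1 q.2 rfl with ⟨hq0, hqa⟩
        by_cases hlt : (0 : Int) < q.1
        · simp only [if_pos hlt]
          exact pvFoldG_abs_zero a target l1 rest
        · have hq : q.1 = 0 := by omega
          have hv : q.2 = a := hqa hq
          simp only [if_neg hlt]
          have hq' : q = (0, a) := Prod.ext hq hv
          rw [hq']
          exact pvFoldG_abs_zero a target l1 rest
    · have hex' : ∃ b' ∈ rest, b' + target = a := by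
        rcases hex with ⟨b', hb', he⟩
        rcases List.mem_cons.1 hb' with h | h
        · exact absurd (h ▸ he) hba
        · exact ⟨b', h, he⟩
      cases hg : pvG (a :: l1) (b + target) with
      | none => exact ih hex' acc hinv
      | some i =>
        have hi : 0 ≤ i := pvG_nonneg _ _ _ hg
        have hine : i ≠ 0 := by
          intro h0
          exact hba (pvG_cons_zero a l1 (b + target) (h0 ▸ hg))
        cases acc with
        | none =>
          exact ih hex' (some (i, b + target)) (by
            intro i' v' h'
            simp only [Option.some.injEq, Prod.mk.injEq] at h'
            obtain ⟨h1, h2⟩ := h'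
            constructor
            · omega
            · intro hz
              exact absurd (by omega : i = 0) hine)
        | some q =>
          rcases hinv q.1 q.2 rfl with ⟨hq0, hqa⟩
          by_cases hlt : i < q.1
          · simp only [if_pos hlt]
            exact ih hex' (some (i, b + target)) (by
              intro i' v' h'
              simp only [Option.some.injEq, Prod.mk.injEq] at h'
              obtain ⟨h1, h2⟩ := h'
              constructor
              · omega
              · intro hz
                exact absurd (by omega : i = 0) hine)
          · simp only [if_neg hlt]
            exact ih hex' (some q) hinv

-- the post-processed argmin equals A's first-hit scan
lemma pvScan_eq_foldG (target : Int) (l1 l2 : List Int) :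
    pvScanA target (PySem.Set.ofList l2) l1
      = match pvFoldG (pvG l1) target l2 none with
        | none => none
        | some q => some (q.2, q.2 - target) := by
  induction l1 with
  | nil => rw [pvFoldG_nil_g]; rfl
  | cons a rest ih =>
    by_cases hmem : (a - target) ∈ l2
    · have hex : ∃ b ∈ l2, b + target = a := ⟨a - target, hmem, by ring⟩
      rw [pvFoldG_hit a target rest l2 hex none (by intro i v h; cases h)]
      simp only [pvScanA]
      rw [if_pos (by simp [PySem.Set.mem_ofList, hmem])]
    · have hno : ∀ b ∈ l2, b + target ≠ a := by
        intro b hb he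
        exact hmem (by rw [← he]; simpa using hb)
      have hshift := pvFoldG_shift a target rest l2 hno none
      simp only [Option.map_none] at hshift
      rw [hshift]
      simp only [pvScanA]
      rw [if_neg (by simp [PySem.Set.mem_ofList, hmem])]
      rw [ih]
      cases pvFoldG (pvG rest) target l2 none with
      | none => rfl
      | some q => rfl

lemma pvSet_ofList_foldl (l : List Int) :
    l.foldl PySem.Set.add PySem.Set.empty = PySem.Set.ofList l := rfl

-- ===== VERDICT (by name: the statement is the Claim_ definition above) =====
theorem sumswap_optimal_spec : Claim_equal_sumswap_optimal := by
  intro list1 list2 _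
  unfold Spec_sumswap_optimal sumswap_optimal sumswap_optimal_alt
  simp only
  split_ifs with h
  · rfl
  · rw [pvSet_ofList_foldl, pvScan_eq_foldG, pvBestB_eq_foldG]
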